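-- pv_equiv track=rewrite | github.com/ZacWhittaker/Models.py | schelling_model.py | is_valid_swap
-- ===== SOURCE A (Python) =====
-- def is_valid_swap(current, proposed, states):
--
--     current = [current[-1]] + current + [current[0]]
--     current_happiness = 0
--
--     for i in range(1, len(current)-1):
--         if states[current[i-1]-1] == states[current[i]-1] or states[current[i+1]-1] == states[current[i]-1]:
--             current_happiness += 1
--
--     proposed = [proposed[-1]] + proposed + [proposed[0]]
--     proposed_happiness = 0
--
--     for i in range(1, len(current)-1):
--         if states[proposed[i-1]-1] == states[proposed[i]-1] or states[proposed[i+1]-1] == states[proposed[i]-1]: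
--             proposed_happiness += 1
--
--     return proposed_happiness > current_happiness
-- ===== SOURCE B (Python) =====
-- def is_valid_swap(current, proposed, states):
--     # Run-length view: a resident is happy iff it lies in a maximal circular run
--     # of equal-state residents of length >= 2; score = sum of such run lengths.
--     def score(ring):
--         vals = [states[x - 1] for x in ring]
--         n = len(vals)
--         start = 0
--         while start < n and vals[start] == vals[start - 1]:
--             start += 1
--         if start == n:
--             return n  # the whole ring is one equal-valued run: everyone is happy
--         seq = vals[start:] + vals[:start]  # rotate so the ring is cut at a run boundary
--         total, run, prev = 0, 1, seq[0]
--         for x in seq[1:]: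
--             if x == prev:
--                 run += 1
--             else:
--                 if run >= 2:
--                     total += run
--                 run = 1
--             prev = x
--         return total + (run if run >= 2 else 0)
--     return score(proposed) > score(current)
-- ===== Notes on version B (the rewrite author's own statement) =====
-- stated objective: alternative
-- what changed: B recasts happiness as a run-length decomposition: it maps each ring to its state sequence, cuts the circle at the first run boundary (or detects the all-equal ring), run-length-encodes the rotated sequence once, and scores the sum of lengths of maximal runs of length >= 2, instead of A's padded-copy per-node rescan of both neighbours.
-- outside the precondition, e.g. on is_valid_swap([1], [1, 1], [1, 2]): A returns False, B returns True; on is_valid_swap([1, 2], [2, 1, 1], [5, 5]): A returns False, B returns True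
import Mathlib
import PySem

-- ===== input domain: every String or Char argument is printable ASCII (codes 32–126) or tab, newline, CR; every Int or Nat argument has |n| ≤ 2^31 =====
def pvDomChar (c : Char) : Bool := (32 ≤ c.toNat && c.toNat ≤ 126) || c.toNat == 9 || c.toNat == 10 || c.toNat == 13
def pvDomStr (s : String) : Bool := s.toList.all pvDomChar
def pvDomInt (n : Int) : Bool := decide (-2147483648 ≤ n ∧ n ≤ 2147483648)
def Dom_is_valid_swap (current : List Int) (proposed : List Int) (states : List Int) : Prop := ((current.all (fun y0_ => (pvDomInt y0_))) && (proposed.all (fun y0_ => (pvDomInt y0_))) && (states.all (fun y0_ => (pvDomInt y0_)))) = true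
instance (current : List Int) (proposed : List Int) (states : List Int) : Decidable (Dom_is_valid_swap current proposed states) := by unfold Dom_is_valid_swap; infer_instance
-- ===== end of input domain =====

-- B scores each ring by run-length decomposition: cut the circle at the first run
-- boundary (or detect the all-equal ring) and sum the lengths of maximal equal-state
-- runs of length ≥ 2, instead of A's padded-copy rescan of both neighbours per node.

-- ===== PORT A =====
def is_valid_swap (current : List Int) (proposed : List Int) (states : List Int) : Bool :=
  let cur : List Int := [PySem.List.pyGetD current (-1) 0] ++ current ++ [PySem.List.pyGetD current 0 0]
  let current_happiness : Int :=
    (PySem.List.pyRange 1 ((cur.length : Int) - 1) 1).foldl (fun acc i =>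
      if PySem.List.pyGetD states (PySem.List.pyGetD cur (i - 1) 0 - 1) 0 =
           PySem.List.pyGetD states (PySem.List.pyGetD cur i 0 - 1) 0 ∨
         PySem.List.pyGetD states (PySem.List.pyGetD cur (i + 1) 0 - 1) 0 =
           PySem.List.pyGetD states (PySem.List.pyGetD cur i 0 - 1) 0
       then acc + 1 else acc) 0
  let prop : List Int := [PySem.List.pyGetD proposed (-1) 0] ++ proposed ++ [PySem.List.pyGetD proposed 0 0]
  let proposed_happiness : Int :=
    (PySem.List.pyRange 1 ((cur.length : Int) - 1) 1).foldl (fun acc i =>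
      if PySem.List.pyGetD states (PySem.List.pyGetD prop (i - 1) 0 - 1) 0 =
           PySem.List.pyGetD states (PySem.List.pyGetD prop i 0 - 1) 0 ∨
         PySem.List.pyGetD states (PySem.List.pyGetD prop (i + 1) 0 - 1) 0 =
           PySem.List.pyGetD states (PySem.List.pyGetD prop i 0 - 1) 0
       then acc + 1 else acc) 0
  decide (proposed_happiness > current_happiness)

-- ===== PORT B =====
-- Source B's 'while start < n and vals[start] == vals[start-1]: start += 1', with the
-- remaining trip count n - k as the structural fuel (exact: the loop runs while k < n).
def pvFindStartAux (v : List Int) (k : Nat) : Nat → Nat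
  | 0 => k
  | fuel + 1 =>
      if PySem.List.pyGetD v (k : Int) 0 = PySem.List.pyGetD v ((k : Int) - 1) 0
      then pvFindStartAux v (k + 1) fuel else k

def pvFindStart (v : List Int) (k : Nat) : Nat := pvFindStartAux v k (v.length - k)

-- the body of Source B's run-length loop, state (total, run, prev)
def pvRunStep (s : Int × Int × Int) (x : Int) : Int × Int × Int :=
  if x = s.2.2 then (s.1, s.2.1 + 1, x)
  else ((if s.2.1 ≥ 2 then s.1 + s.2.1 else s.1), 1, x)

def pvScore (states ring : List Int) : Int :=
  let vals := ring.map (fun x => PySem.List.pyGetD states (x - 1) 0)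
  let n := vals.length
  let start := pvFindStart vals 0
  if start = n then (n : Int)
  else
    -- vals[start:] + vals[:start]  (exact: here 0 ≤ start ≤ n)
    let seq := vals.drop start ++ vals.take start
    let st := seq.tail.foldl pvRunStep (0, 1, PySem.List.pyGetD seq 0 0)
    st.1 + (if st.2.1 ≥ 2 then st.2.1 else 0)

def is_valid_swap_alt (current : List Int) (proposed : List Int) (states : List Int) : Bool :=
  decide (pvScore states proposed > pvScore states current)

-- ===== PRECONDITION & SPEC =====
-- Pre_ restricts to the function's natural domain: nonempty rings of EQUAL length whose
-- entries are valid 1-based (Python-style, possibly negative) indices into states.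
-- Outside it A raises IndexError (empty ring, proposed shorter, entry out of range) or —
-- when proposed is longer than current — A returns a score of only a prefix of proposed,
-- a comparison of unequal-length configurations that no swap can produce.
def Pre_is_valid_swap (current : List Int) (proposed : List Int) (states : List Int) : Prop :=
  current ≠ [] ∧ proposed.length = current.length ∧
  (∀ x ∈ current, PySem.Raise.InRange states.length (x - 1)) ∧
  (∀ x ∈ proposed, PySem.Raise.InRange states.length (x - 1))
instance (current : List Int) (proposed : List Int) (states : List Int) : Decidable (Pre_is_valid_swap current proposed states) := by unfold Pre_is_valid_swap; infer_instance

def pvWitness_is_valid_swap : List Int × List Int × List Int := ([1, 2], [2, 1], [7, 7])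

def Spec_is_valid_swap (current : List Int) (proposed : List Int) (states : List Int) (out : Bool) : Prop := out = is_valid_swap_alt current proposed states
instance (current : List Int) (proposed : List Int) (states : List Int) (out : Bool) : Decidable (Spec_is_valid_swap current proposed states out) := by unfold Spec_is_valid_swap; infer_instance

-- ===== CLAIM (what is proved, stated in full; the proofs are below) =====
def Claim_equal_is_valid_swap : Prop := ∀ (current : List Int) (proposed : List Int) (states : List Int), Dom_is_valid_swap current proposed states → Pre_is_valid_swap current proposed states → Spec_is_valid_swap current proposed states (is_valid_swap current proposed states)


-- ===== LEMMAS AND PROOFS =====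

-- node i of the ring with state sequence v is happy: an adjacent node has the same state
def pvHappy (v : List Int) (i : Nat) : Bool :=
  decide (v.getD ((i + v.length - 1) % v.length) 0 = v.getD i 0) ||
  decide (v.getD ((i + 1) % v.length) 0 = v.getD i 0)

-- node j of the LINEAR sequence l has an equal linear neighbour
def pvHL (l : List Int) (j : Nat) : Bool :=
  (decide (0 < j) && decide (l.getD (j - 1) 0 = l.getD j 0)) ||
  (decide (j + 1 < l.length) && decide (l.getD (j + 1) 0 = l.getD j 0))

lemma pvMapGetD (s r : List Int) (idx : Nat) (h : idx < r.length) :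
    (r.map (fun x => PySem.List.pyGetD s (x - 1) 0)).getD idx 0
      = PySem.List.pyGetD s (r.getD idx 0 - 1) 0 := by
  rw [List.getD_eq_getElem _ _ (by simpa using h), List.getD_eq_getElem _ _ h, List.getElem_map]

lemma pvModPred (n j : Nat) (h1 : 1 ≤ j) (hj : j < n) : (j + n - 1) % n = j - 1 := by
  have h2 : j + n - 1 = (j - 1) + n := by omega
  rw [h2, Nat.add_mod_right]
  exact Nat.mod_eq_of_lt (by omega)

-- an 'if cond: acc += 1' fold is a countP (Prop-condition form of PySem.List.foldl_count_if)
lemma pvCountIf (q : Int → Prop) [DecidablePred q] (l : List Int) (a : Int) :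
    l.foldl (fun acc x => if q x then acc + 1 else acc) a
      = a + (l.countP (fun x => decide (q x)) : Int) := by
  have h : (fun (acc x : Int) => if q x then acc + 1 else acc)
      = (fun (acc x : Int) => if (fun x => decide (q x)) x = true then acc + 1 else acc) := by
    funext acc x
    by_cases hq : q x <;> simp [hq]
  rw [h, PySem.List.foldl_count_if]

-- the three relevant entries of A's padded copy [r[-1]] + r + [r[0]], in ring terms
lemma pvPadL (r : List Int) (hr : r ≠ []) (k : Nat) (hk : k < r.length) :
    ([PySem.List.pyGetD r (-1) 0] ++ r ++ [PySem.List.pyGetD r 0 0]).getD k 0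
      = r.getD ((k + r.length - 1) % r.length) 0 := by
  have hn : 0 < r.length := List.length_pos_of_ne_nil hr
  rcases Nat.eq_zero_or_pos k with h0 | h1
  · subst h0
    have hm : (0 + r.length - 1) % r.length = r.length - 1 := by
      have h2 : 0 + r.length - 1 = r.length - 1 := by omega
      rw [h2]
      exact Nat.mod_eq_of_lt (by omega)
    rw [hm, PySem.List.pyGetD_neg_one r 0 hr]
    rw [List.getLast_eq_getElem, List.getD_eq_getElem r 0 (by omega)]
    simp
  · rw [pvModPred r.length k h1 hk]
    obtain ⟨k', rfl⟩ : ∃ k', k = k' + 1 := ⟨k - 1, by omega⟩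
    simp only [List.cons_append, List.getD_cons_succ, List.nil_append]
    rw [List.getD_eq_getElem?_getD, List.getElem?_append_left (by omega), ← List.getD_eq_getElem?_getD]
    simp

lemma pvPadM (r : List Int) (k : Nat) (hk : k < r.length) :
    ([PySem.List.pyGetD r (-1) 0] ++ r ++ [PySem.List.pyGetD r 0 0]).getD (k + 1) 0
      = r.getD k 0 := by
  simp only [List.cons_append, List.getD_cons_succ, List.nil_append]
  rw [List.getD_eq_getElem?_getD, List.getElem?_append_left (by omega), ← List.getD_eq_getElem?_getD]

lemma pvPadR (r : List Int) (hr : r ≠ []) (k : Nat) (hk : k < r.length) :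
    ([PySem.List.pyGetD r (-1) 0] ++ r ++ [PySem.List.pyGetD r 0 0]).getD (k + 2) 0
      = r.getD ((k + 1) % r.length) 0 := by
  have hn : 0 < r.length := List.length_pos_of_ne_nil hr
  simp only [List.cons_append, List.getD_cons_succ, List.nil_append]
  rcases Nat.lt_or_ge (k + 1) r.length with hlt | hge
  · rw [Nat.mod_eq_of_lt hlt]
    rw [List.getD_eq_getElem?_getD, List.getElem?_append_left hlt, ← List.getD_eq_getElem?_getD]
  · have hkk : k + 1 = r.length := by omega
    rw [hkk, Nat.mod_self]
    rw [List.getD_eq_getElem?_getD, List.getElem?_append_right (by omega)]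
    simp [PySem.List.pyGetD_zero]

-- A's per-ring loop counts the happy nodes
lemma pvAScore (s r : List Int) (hr : r ≠ []) :
    ((PySem.List.pyRange 1 (((r.length + 2 : Nat) : Int) - 1) 1).foldl (fun acc i =>
      if PySem.List.pyGetD s (PySem.List.pyGetD ([PySem.List.pyGetD r (-1) 0] ++ r ++ [PySem.List.pyGetD r 0 0]) (i - 1) 0 - 1) 0 =
           PySem.List.pyGetD s (PySem.List.pyGetD ([PySem.List.pyGetD r (-1) 0] ++ r ++ [PySem.List.pyGetD r 0 0]) i 0 - 1) 0 ∨
         PySem.List.pyGetD s (PySem.List.pyGetD ([PySem.List.pyGetD r (-1) 0] ++ r ++ [PySem.List.pyGetD r 0 0]) (i + 1) 0 - 1) 0 =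
           PySem.List.pyGetD s (PySem.List.pyGetD ([PySem.List.pyGetD r (-1) 0] ++ r ++ [PySem.List.pyGetD r 0 0]) i 0 - 1) 0
       then acc + 1 else acc) (0 : Int))
      = ((List.range r.length).countP (pvHappy (r.map (fun x => PySem.List.pyGetD s (x - 1) 0))) : Int) := by
  have hn : 0 < r.length := List.length_pos_of_ne_nil hr
  rw [pvCountIf]
  have hb : (((r.length + 2 : Nat) : Int) - 1 - 1).toNat = r.length := by push_cast; omega
  rw [PySem.List.pyRange_one, hb, List.countP_map]
  rw [zero_add, Int.natCast_inj]
  apply List.countP_congr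
  intro k hk
  have hkn : k < r.length := List.mem_range.mp hk
  simp only [Function.comp_apply]
  have e1 : (1 : Int) + (k : Nat) - 1 = ((k : Nat) : Int) := by omega
  have e2 : (1 : Int) + (k : Nat) = (((k + 1 : Nat)) : Int) := by omega
  have e3 : (((k + 1 : Nat)) : Int) + 1 = (((k + 2 : Nat)) : Int) := by omega
  rw [e1, e2, e3]
  simp only [PySem.List.pyGetD_natCast]
  rw [pvPadL r hr k hkn, pvPadM r k hkn, pvPadR r hr k hkn]
  simp only [pvHappy, List.length_map,
    pvMapGetD s r ((k + r.length - 1) % r.length) (Nat.mod_lt _ hn),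
    pvMapGetD s r k hkn,
    pvMapGetD s r ((k + 1) % r.length) (Nat.mod_lt _ hn),
    Bool.or_eq_true, decide_eq_true_eq]

-- ===== the pvFindStart while-loop: specification =====

lemma pvFindStartAux_le (v : List Int) : ∀ (fuel k : Nat), fuel = v.length - k → k ≤ v.length →
    pvFindStartAux v k fuel ≤ v.length := by
  intro fuel
  induction fuel with
  | zero => intro k hf hk; simpa [pvFindStartAux] using hk
  | succ f ih =>
      intro k hf hk
      simp only [pvFindStartAux]
      split
      · exact ih (k + 1) (by omega) (by omega)
      · exact hk

lemma pvFindStartAux_all (v : List Int) : ∀ (fuel k : Nat), fuel = v.length - k →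
    pvFindStartAux v k fuel = v.length →
    ∀ i, k ≤ i → i < v.length →
      PySem.List.pyGetD v (i : Int) 0 = PySem.List.pyGetD v ((i : Int) - 1) 0 := by
  intro fuel
  induction fuel with
  | zero =>
      intro k hf hres i hki hi
      simp only [pvFindStartAux] at hres
      omega
  | succ f ih =>
      intro k hf hres i hki hi
      simp only [pvFindStartAux] at hres
      split at hres
      · next heq =>
          rcases Nat.eq_or_lt_of_le hki with h | h
          · subst h; exact heq
          · exact ih (k + 1) (by omega) hres i (by omega) hi
      · omega

lemma pvFindStartAux_stop (v : List Int) : ∀ (fuel k : Nat), fuel = v.length - k →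
    pvFindStartAux v k fuel < v.length →
    ¬ (PySem.List.pyGetD v ((pvFindStartAux v k fuel : Nat) : Int) 0
        = PySem.List.pyGetD v (((pvFindStartAux v k fuel : Nat) : Int) - 1) 0) := by
  intro fuel
  induction fuel with
  | zero =>
      intro k hf hres
      simp only [pvFindStartAux] at hres
      exact absurd hres (by omega)
  | succ f ih =>
      intro k hf hres
      by_cases hc : PySem.List.pyGetD v ((k : Nat) : Int) 0 = PySem.List.pyGetD v (((k : Nat) : Int) - 1) 0
      · simp only [pvFindStartAux, if_pos hc] at hres ⊢
        exact ih (k + 1) (by omega) hres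
      · simp only [pvFindStartAux, if_neg hc] at hres ⊢
        exact hc

lemma pvFindStart_le (v : List Int) : pvFindStart v 0 ≤ v.length := by
  unfold pvFindStart
  exact pvFindStartAux_le v (v.length - 0) 0 rfl (Nat.zero_le _)

lemma pvFindStart_stop (v : List Int) (h : pvFindStart v 0 < v.length) :
    ¬ (PySem.List.pyGetD v ((pvFindStart v 0 : Nat) : Int) 0
        = PySem.List.pyGetD v (((pvFindStart v 0 : Nat) : Int) - 1) 0) := by
  unfold pvFindStart at h ⊢
  exact pvFindStartAux_stop v (v.length - 0) 0 rfl h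

lemma pvFindStart_all (v : List Int) (h : pvFindStart v 0 = v.length) :
    ∀ i, i < v.length →
      PySem.List.pyGetD v (i : Int) 0 = PySem.List.pyGetD v ((i : Int) - 1) 0 := by
  unfold pvFindStart at h
  exact fun i hi => pvFindStartAux_all v (v.length - 0) 0 rfl h i (Nat.zero_le _) hi

-- all circularly-chained-equal implies all entries equal to the first
lemma pvChain (v : List Int)
    (h : ∀ i, i < v.length → PySem.List.pyGetD v (i : Int) 0 = PySem.List.pyGetD v ((i : Int) - 1) 0) :
    ∀ i, i < v.length → v.getD i 0 = v.getD 0 0 := by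
  intro i
  induction i with
  | zero => intro _; rfl
  | succ i ih =>
      intro hi
      have hstep := h (i + 1) hi
      have hc : (((i + 1 : Nat) : Int)) - 1 = ((i : Nat) : Int) := by push_cast; ring
      rw [hc, PySem.List.pyGetD_natCast, PySem.List.pyGetD_natCast] at hstep
      rw [hstep]
      exact ih (by omega)

lemma pvHappyAll (v : List Int) (hv : 0 < v.length)
    (hall : ∀ i, i < v.length → v.getD i 0 = v.getD 0 0) :
    (List.range v.length).countP (pvHappy v) = v.length := by
  have hall2 : ∀ j ∈ List.range v.length, pvHappy v j = true := by
    intro j hj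
    have hjn : j < v.length := List.mem_range.mp hj
    have h1 : (j + 1) % v.length < v.length := Nat.mod_lt _ hv
    unfold pvHappy
    have e1 := hall j hjn
    have e2 := hall ((j + 1) % v.length) h1
    simp only [Bool.or_eq_true, decide_eq_true_eq]
    right
    rw [e1, e2]
  rw [List.countP_eq_length.mpr hall2, List.length_range]

-- ===== rotation =====

lemma pvRotGetD (v : List Int) (start j : Nat) (hs : start ≤ v.length) (hj : j < v.length) :
    (v.drop start ++ v.take start).getD j 0 = v.getD ((j + start) % v.length) 0 := by
  rcases Nat.lt_or_ge j (v.length - start) with h | h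
  · rw [Nat.mod_eq_of_lt (by omega)]
    rw [List.getD_eq_getElem?_getD, List.getElem?_append_left (by simp; omega),
      List.getElem?_drop, ← List.getD_eq_getElem?_getD]
    congr 1
    omega
  · have hmod : (j + start) % v.length = j + start - v.length := by
      rw [Nat.mod_eq_sub_mod (by omega)]
      exact Nat.mod_eq_of_lt (by omega)
    rw [hmod]
    rw [List.getD_eq_getElem?_getD, List.getElem?_append_right (by simp; omega),
      List.getElem?_take]
    simp only [List.length_drop]
    rw [if_pos (by omega), ← List.getD_eq_getElem?_getD]
    congr 1
    omega

lemma pvRotLen (v : List Int) (start : Nat) (hs : start ≤ v.length) :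
    (v.drop start ++ v.take start).length = v.length := by
  simp
  omega

lemma pvHappyRot (v : List Int) (start j : Nat) (hs : start < v.length) (hj : j < v.length) :
    pvHappy (v.drop start ++ v.take start) j = pvHappy v ((j + start) % v.length) := by
  have hn : 0 < v.length := by omega
  have hsle : start ≤ v.length := le_of_lt hs
  have hw : (v.drop start ++ v.take start).length = v.length := pvRotLen v start hsle
  unfold pvHappy
  rw [hw]
  rw [pvRotGetD v start j hsle hj,
    pvRotGetD v start ((j + v.length - 1) % v.length) hsle (Nat.mod_lt _ hn),
    pvRotGetD v start ((j + 1) % v.length) hsle (Nat.mod_lt _ hn)]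
  have hL : ((j + v.length - 1) % v.length + start) % v.length
      = ((j + start) % v.length + v.length - 1) % v.length := by
    have a2 : (j + start) % v.length + v.length - 1 = (j + start) % v.length + (v.length - 1) := by
      omega
    rw [Nat.mod_add_mod, a2, Nat.mod_add_mod]
    congr 1
    omega
  have hR : ((j + 1) % v.length + start) % v.length = ((j + start) % v.length + 1) % v.length := by
    rw [Nat.mod_add_mod, Nat.mod_add_mod]
    congr 1
    omega
  rw [hL, hR]

lemma pvCountRot (n start : Nat) (hs : start < n) (p : Nat → Bool) :
    (List.range n).countP (fun j => p ((j + start) % n)) = (List.range n).countP p := by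
  have hn : 0 < n := by omega
  have hinj : ∀ x ∈ List.range n, ∀ y ∈ List.range n, (x + start) % n = (y + start) % n → x = y := by
    intro x hx y hy h
    have hx' := List.mem_range.mp hx
    have hy' := List.mem_range.mp hy
    have hme : x ≡ y [MOD n] := Nat.ModEq.add_right_cancel' start h
    rwa [Nat.ModEq, Nat.mod_eq_of_lt hx', Nat.mod_eq_of_lt hy'] at hme
  have hnd : ((List.range n).map (fun j => (j + start) % n)).Nodup :=
    List.Nodup.map_on hinj List.nodup_range
  have hsub : ((List.range n).map (fun j => (j + start) % n)) ⊆ List.range n := by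
    intro a ha
    rcases List.mem_map.mp ha with ⟨j, hj, rfl⟩
    exact List.mem_range.mpr (Nat.mod_lt _ hn)
  have hperm : ((List.range n).map (fun j => (j + start) % n)).Perm (List.range n) :=
    (hnd.subperm hsub).perm_of_length_le (by simp)
  calc (List.range n).countP (fun j => p ((j + start) % n))
      = ((List.range n).map (fun j => (j + start) % n)).countP p := by
        rw [List.countP_map]
        rfl
    _ = (List.range n).countP p := hperm.countP_eq p

-- ===== linear run-length counting =====

lemma pvHLRep (k : Nat) (c : Int) (j : Nat) (hj : j < k) :
    pvHL (List.replicate k c) j = decide (2 ≤ k) := by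
  unfold pvHL
  simp only [List.getD_eq_getElem?_getD, List.getElem?_replicate, List.length_replicate]
  by_cases h2 : 2 ≤ k
  · rcases Nat.eq_zero_or_pos j with h0 | h1
    · subst h0
      simp [h2, show 1 < k by omega, show 0 < k by omega]
    · simp [h2, h1, hj, show j - 1 < k by omega]
  · have hk1 : k = 1 := by omega
    have hj0 : j = 0 := by omega
    subst hk1
    subst hj0
    simp

lemma pvHLLeft (k : Nat) (hk : 1 ≤ k) (prev x : Int) (hne : prev ≠ x) (xs : List Int)
    (j : Nat) (hj : j < k) :
    pvHL (List.replicate k prev ++ x :: xs) j = decide (2 ≤ k) := by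
  have hget : ∀ i, i < k → (List.replicate k prev ++ x :: xs)[i]? = some prev := by
    intro i hi
    rw [List.getElem?_append_left (by simp [hi]), List.getElem?_replicate, if_pos hi]
  have hgetk : (List.replicate k prev ++ x :: xs)[k]? = some x := by
    rw [List.getElem?_append_right (by simp), List.length_replicate]
    simp
  unfold pvHL
  simp only [List.getD_eq_getElem?_getD, List.length_append, List.length_replicate,
    List.length_cons]
  by_cases h2 : 2 ≤ k
  · rcases Nat.eq_zero_or_pos j with h0 | h1
    · subst h0
      rw [hget 0 (by omega), hget 1 (by omega)]
      simp [h2, show 0 + 1 < k + (xs.length + 1) by omega]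
    · rw [hget j hj, hget (j - 1) (by omega)]
      simp [h2, h1]
  · have hk1 : k = 1 := by omega
    have hj0 : j = 0 := by omega
    subst hk1
    subst hj0
    rw [hget 0 (by omega), show (0 : Nat) + 1 = 1 from rfl, hgetk]
    simp [hne.symm]

lemma pvHLRight (k : Nat) (hk : 1 ≤ k) (prev x : Int) (hne : prev ≠ x) (xs : List Int)
    (j : Nat) :
    pvHL (List.replicate k prev ++ x :: xs) (k + j) = pvHL (x :: xs) j := by
  have hR : ∀ i : Nat, (List.replicate k prev ++ x :: xs)[k + i]? = (x :: xs)[i]? := by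
    intro i
    rw [List.getElem?_append_right (by simp), List.length_replicate]
    congr 1
    omega
  unfold pvHL
  simp only [List.getD_eq_getElem?_getD, List.length_append, List.length_replicate,
    List.length_cons]
  rcases Nat.eq_zero_or_pos j with h0 | h1
  · subst h0
    have hprev : (List.replicate k prev ++ x :: xs)[k - 1]? = some prev := by
      rw [List.getElem?_append_left (by simp; omega), List.getElem?_replicate, if_pos (by omega)]
    rw [Nat.add_zero, hprev, show k + 1 = k + (0 + 1) from rfl, hR (0 + 1),
      show (List.replicate k prev ++ x :: xs)[k]? = some x from hR 0]
    simp [hne,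
      show k + (0 + 1) < k + (xs.length + 1) ↔ 0 + 1 < xs.length + 1 by omega]
  · rw [show k + j - 1 = k + (j - 1) by omega, hR (j - 1), hR j, show k + j + 1 = k + (j + 1) from by omega, hR (j + 1)]
    simp [show 0 < k + j by omega, h1,
      show k + (j + 1) < k + (xs.length + 1) ↔ j + 1 < xs.length + 1 by omega]

lemma pvCountRep (k : Nat) (c : Int) :
    (List.range k).countP (pvHL (List.replicate k c)) = if 2 ≤ k then k else 0 := by
  rw [List.countP_congr (q := fun _ => decide (2 ≤ k))
    (fun j hj => by rw [pvHLRep k c j (List.mem_range.mp hj)])]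
  by_cases h2 : 2 ≤ k <;> simp [h2]

lemma pvCountSplit (k : Nat) (hk : 1 ≤ k) (prev x : Int) (hne : prev ≠ x) (xs : List Int) :
    (List.range (k + (xs.length + 1))).countP (pvHL (List.replicate k prev ++ x :: xs))
      = (if 2 ≤ k then k else 0) + (List.range (xs.length + 1)).countP (pvHL (x :: xs)) := by
  have h1 : (List.range k).countP (pvHL (List.replicate k prev ++ x :: xs))
      = if 2 ≤ k then k else 0 := by
    rw [List.countP_congr (q := fun _ => decide (2 ≤ k))
      (fun j hj => by rw [pvHLLeft k hk prev x hne xs j (List.mem_range.mp hj)])]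
    by_cases h2 : 2 ≤ k <;> simp [h2]
  have h2 : (List.range (xs.length + 1)).countP
        ((pvHL (List.replicate k prev ++ x :: xs)) ∘ (fun j => k + j))
      = (List.range (xs.length + 1)).countP (pvHL (x :: xs)) := by
    apply List.countP_congr
    intro j hj
    simp only [Function.comp_apply]
    rw [pvHLRight k hk prev x hne xs j]
  rw [List.range_add, List.countP_append, List.countP_map, h1, h2]

lemma pvFoldCount (xs : List Int) (prev : Int) (k : Nat) (hk : 1 ≤ k) (total : Int) :
    (xs.foldl pvRunStep (total, (k : Int), prev)).1
      + (if (xs.foldl pvRunStep (total, (k : Int), prev)).2.1 ≥ 2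
         then (xs.foldl pvRunStep (total, (k : Int), prev)).2.1 else 0)
    = total + ((List.range (k + xs.length)).countP (pvHL (List.replicate k prev ++ xs)) : Int) := by
  induction xs generalizing prev k total with
  | nil =>
      simp only [List.foldl_nil, List.length_nil, List.append_nil, Nat.add_zero]
      rw [pvCountRep]
      split_ifs <;> push_cast <;> omega
  | cons x xs ih =>
      simp only [List.foldl_cons, pvRunStep]
      by_cases hx : x = prev
      · rw [if_pos hx]
        subst hx
        rw [show ((k : Int) + 1) = ((k + 1 : Nat) : Int) from by push_cast; ring]
        rw [ih x (k + 1) (by omega) total, List.append_cons, ← List.replicate_succ',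
          show k + (x :: xs).length = (k + 1) + xs.length from by simp; omega]
      · rw [if_neg hx]
        rw [show (1 : Int) = ((1 : Nat) : Int) from rfl]
        rw [ih x 1 (le_refl 1) _, List.replicate_one, List.singleton_append]
        simp only [List.length_cons]
        rw [pvCountSplit k hk prev x (fun h => hx h.symm) xs, Nat.add_comm 1 xs.length]
        split_ifs <;> push_cast <;> omega

-- with a mismatching wrap-around edge, circular happiness is linear happiness
lemma pvHappyEqHL (w : List Int) (hw : 0 < w.length)
    (hmm : w.getD 0 0 ≠ w.getD (w.length - 1) 0) (j : Nat) (hj : j < w.length) :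
    pvHappy w j = pvHL w j := by
  have hn2 : 2 ≤ w.length := by
    rcases Nat.lt_or_ge w.length 2 with h | h
    · exfalso
      apply hmm
      rw [show w.length - 1 = 0 from by omega]
    · exact h
  unfold pvHappy pvHL
  by_cases hj0 : j = 0
  · subst hj0
    rw [show (0 + w.length - 1) % w.length = w.length - 1 from by
        rw [show 0 + w.length - 1 = w.length - 1 from by omega]
        exact Nat.mod_eq_of_lt (by omega),
      show (0 + 1) % w.length = 0 + 1 from Nat.mod_eq_of_lt (by omega)]
    rw [Bool.eq_iff_iff]
    simp only [Bool.or_eq_true, Bool.and_eq_true, decide_eq_true_eq]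
    constructor
    · rintro (h | h)
      · exact absurd h.symm hmm
      · exact Or.inr ⟨by omega, h⟩
    · rintro (⟨h0, -⟩ | ⟨-, h⟩)
      · exact absurd h0 (lt_irrefl 0)
      · exact Or.inr h
  · have hj1 : 1 ≤ j := by omega
    rw [pvModPred w.length j hj1 hj]
    by_cases hjl : j + 1 < w.length
    · rw [Nat.mod_eq_of_lt hjl, Bool.eq_iff_iff]
      simp only [Bool.or_eq_true, Bool.and_eq_true, decide_eq_true_eq]
      constructor
      · rintro (h | h)
        · exact Or.inl ⟨by omega, h⟩
        · exact Or.inr ⟨hjl, h⟩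
      · rintro (⟨-, h⟩ | ⟨-, h⟩)
        · exact Or.inl h
        · exact Or.inr h
    · have hv0 : ¬ (w.getD 0 0 = w.getD j 0) := by
        rw [show j = w.length - 1 from by omega]
        exact hmm
      rw [show j + 1 = w.length from by omega, Nat.mod_self, Bool.eq_iff_iff]
      simp only [Bool.or_eq_true, Bool.and_eq_true, decide_eq_true_eq]
      constructor
      · rintro (h | h)
        · exact Or.inl ⟨by omega, h⟩
        · exact absurd h hv0
      · rintro (⟨-, h⟩ | ⟨hl, -⟩)
        · exact Or.inl h
        · exact absurd hl (lt_irrefl _)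

-- B's score is the number of happy nodes
lemma pvBScore (s r : List Int) (hr : r ≠ []) :
    pvScore s r
      = ((List.range r.length).countP (pvHappy (r.map (fun x => PySem.List.pyGetD s (x - 1) 0))) : Int) := by
  have hn : 0 < r.length := List.length_pos_of_ne_nil hr
  simp only [pvScore]
  set v : List Int := r.map (fun x => PySem.List.pyGetD s (x - 1) 0) with hvdef
  have hvl : v.length = r.length := by simp [hvdef]
  have hvn : 0 < v.length := by omega
  rw [← hvl]
  by_cases hst : pvFindStart v 0 = v.length
  · rw [if_pos hst]
    have hchain := pvChain v (pvFindStart_all v hst)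
    rw [pvHappyAll v hvn hchain]
  · rw [if_neg hst]
    have hlt : pvFindStart v 0 < v.length := lt_of_le_of_ne (pvFindStart_le v) hst
    set st := pvFindStart v 0 with hstdef
    have hstop : ¬ (PySem.List.pyGetD v ((st : Nat) : Int) 0
        = PySem.List.pyGetD v (((st : Nat) : Int) - 1) 0) := pvFindStart_stop v hlt
    set w : List Int := v.drop st ++ v.take st with hwdef
    have hwl : w.length = v.length := pvRotLen v st (le_of_lt hlt)
    have hwne : w ≠ [] := by
      intro h
      rw [h] at hwl
      simp at hwl
      omega
    have hwn : 0 < w.length := by omega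
    -- the wrap-around edge of w is the boundary pvFindStart stopped at
    have hw0 : w.getD 0 0 = v.getD st 0 := by
      rw [pvRotGetD v st 0 (le_of_lt hlt) hvn, Nat.zero_add, Nat.mod_eq_of_lt hlt]
    have hwlast : w.getD (w.length - 1) 0 = v.getD ((st + v.length - 1) % v.length) 0 := by
      rw [hwl, pvRotGetD v st (v.length - 1) (le_of_lt hlt) (by omega)]
      congr 1
      congr 1
      omega
    have hmm : w.getD 0 0 ≠ w.getD (w.length - 1) 0 := by
      rw [hw0, hwlast]
      intro h
      apply hstop
      rw [PySem.List.pyGetD_natCast]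
      rcases Nat.eq_zero_or_pos st with h0 | h1
      · rw [h0] at h ⊢
        rw [show ((0 : Nat) : Int) - 1 = -1 from rfl, PySem.List.pyGetD_neg_one v 0 (by
          intro hv; rw [hv] at hvn; simp at hvn)]
        rw [List.getLast_eq_getElem, ← List.getD_eq_getElem v 0 (by omega)]
        rw [show (0 + v.length - 1) % v.length = v.length - 1 from by
          rw [show 0 + v.length - 1 = v.length - 1 from by omega]
          exact Nat.mod_eq_of_lt (by omega)] at h
        exact h
      · rw [show ((st : Nat) : Int) - 1 = ((st - 1 : Nat) : Int) from by omega,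
          PySem.List.pyGetD_natCast]
        rw [pvModPred v.length st h1 hlt] at h
        exact h
    -- the run-length fold counts the linearly happy nodes of w
    have hhead : PySem.List.pyGetD w 0 0 = w.getD 0 0 := by
      rw [show (0 : Int) = ((0 : Nat) : Int) from rfl, PySem.List.pyGetD_natCast]
    obtain ⟨a, t, hwc⟩ := List.exists_cons_of_ne_nil hwne
    have hcons : w.getD 0 0 :: w.tail = w := by
      rw [hwc]
      rfl
    have hfc := pvFoldCount w.tail (w.getD 0 0) 1 (le_refl 1) 0
    rw [Nat.cast_one, List.replicate_one, List.singleton_append, hcons,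
      show 1 + w.tail.length = w.length from by
        rw [hwc]
        simp [Nat.add_comm]] at hfc
    rw [hhead, hfc, zero_add]
    -- linear happiness = circular happiness on w, then rotate back
    rw [List.countP_congr (q := pvHappy w)
      (fun j hj => by rw [pvHappyEqHL w hwn hmm j (List.mem_range.mp hj)])]
    rw [hwl]
    rw [List.countP_congr (q := fun j => pvHappy v ((j + st) % v.length))
      (fun j hj => by rw [hwdef, pvHappyRot v st j hlt (List.mem_range.mp hj)])]
    rw [pvCountRot v.length st hlt (pvHappy v)]

-- ===== VERDICT (by name: the statement is the Claim_ definition above) =====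
theorem is_valid_swap_spec : Claim_equal_is_valid_swap := by
  intro current proposed states _ hpre
  obtain ⟨hc, hlen, -, -⟩ := hpre
  have hp : proposed ≠ [] := by
    intro h; subst h; simp at hlen; exact hc (List.eq_nil_of_length_eq_zero hlen.symm)
  unfold Spec_is_valid_swap
  simp only [is_valid_swap, is_valid_swap_alt]
  have hL : ([PySem.List.pyGetD current (-1) 0] ++ current ++ [PySem.List.pyGetD current 0 0]).length
      = current.length + 2 := by simp
  rw [hL, pvAScore states current hc]
  rw [show (((current.length + 2 : Nat)) : Int) - 1 = (((proposed.length + 2 : Nat)) : Int) - 1 from by rw [hlen]]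
  rw [pvAScore states proposed hp]
  rw [pvBScore states current hc, pvBScore states proposed hp]
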